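-- pv_equiv track=rewrite | github.com/KohakuBlueleaf/UwUDiff | src/duwu/utils/__init__.py | balance_sharding_index
-- ===== SOURCE A (Python) =====
-- def balance_sharding_index(total, shards):
--     prev = 0
--     for i in range(shards):
--         this_shard = total // shards
--         yield prev, this_shard
--         shards -= 1
--         total -= this_shard
--         prev += this_shard
-- ===== SOURCE B (Python) =====
-- def balance_sharding_index(total, shards):
--     if shards <= 0:
--         return
--     base, rem = divmod(total, shards)
--     start = 0
--     for i in range(shards):
--         size = base + 1 if i >= shards - rem else base
--         yield start, size
--         start += size
-- ===== Notes on version B (the rewrite author's own statement) =====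
-- stated objective: alternative
-- what changed: replaces A's shrinking-division recurrence (recompute total//shards with both operands mutated each iteration) by computing base = total // shards and rem = total % shards once and emitting base+1-sized shards for the last rem indices with a running start
import Mathlib
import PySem

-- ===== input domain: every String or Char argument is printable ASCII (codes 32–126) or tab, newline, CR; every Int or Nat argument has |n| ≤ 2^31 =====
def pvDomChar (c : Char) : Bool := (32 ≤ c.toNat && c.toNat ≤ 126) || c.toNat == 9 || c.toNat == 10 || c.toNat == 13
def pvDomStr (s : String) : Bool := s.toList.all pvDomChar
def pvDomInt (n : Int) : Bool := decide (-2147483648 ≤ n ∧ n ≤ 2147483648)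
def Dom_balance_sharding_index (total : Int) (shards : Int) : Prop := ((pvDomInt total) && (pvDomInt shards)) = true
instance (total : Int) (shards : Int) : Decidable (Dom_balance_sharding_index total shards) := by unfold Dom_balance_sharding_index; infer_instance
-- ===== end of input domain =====

-- B computes base = total // shards and rem = total % shards once and places the base+1 shards
-- at the last rem indices, instead of A's per-iteration shrinking division; same cost, plainer.

-- ===== PORT A =====
-- generator consumed as a list; state (prev, total, shards, acc), one step per element of range(shards)
def balance_sharding_index (total : Int) (shards : Int) : List (Int × Int) :=
  ((PySem.List.pyRange 0 shards 1).foldl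
    (fun (st : Int × Int × Int × List (Int × Int)) _ =>
      let prev := st.1
      let tot := st.2.1
      let sh := st.2.2.1
      let acc := st.2.2.2
      let this_shard := PySem.Int.floordiv tot sh
      (prev + this_shard, tot - this_shard, sh - 1, acc ++ [(prev, this_shard)]))
    (0, total, shards, [])).2.2.2

-- ===== PORT B =====
def balance_sharding_index_alt (total : Int) (shards : Int) : List (Int × Int) :=
  if shards ≤ 0 then []
  else
    let base := PySem.Int.floordiv total shards
    let rem := PySem.Int.mod total shards
    ((PySem.List.pyRange 0 shards 1).foldl
      (fun (st : Int × List (Int × Int)) i =>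
        let size := if shards - rem ≤ i then base + 1 else base
        (st.1 + size, st.2 ++ [(st.1, size)]))
      (0, [])).2

-- ===== PRECONDITION & SPEC =====
def Spec_balance_sharding_index (total : Int) (shards : Int) (out : List (Int × Int)) : Prop := out = balance_sharding_index_alt total shards
instance (total : Int) (shards : Int) (out : List (Int × Int)) : Decidable (Spec_balance_sharding_index total shards out) := by unfold Spec_balance_sharding_index; infer_instance

-- ===== CLAIM (what is proved, stated in full; the proofs are below) =====
def Claim_equal_balance_sharding_index : Prop := ∀ (total : Int) (shards : Int), Dom_balance_sharding_index total shards → Spec_balance_sharding_index total shards (balance_sharding_index total shards)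

-- ===== LEMMAS AND PROOFS =====

-- common recursive description: n shards remaining, running start `prev`, remaining total `t`
def shardRec : Nat → Int → Int → List (Int × Int)
  | 0, _, _ => []
  | m + 1, prev, t =>
      let q := PySem.Int.floordiv t ((m : Int) + 1)
      (prev, q) :: shardRec m (prev + q) (t - q)

-- recursive form of B's fold (q, r, nS fixed)
def goB (q r nS : Int) : Int → List Int → List (Int × Int)
  | _, [] => []
  | start, i :: rest =>
      let size := if nS - r ≤ i then q + 1 else q
      (start, size) :: goB q r nS (start + size) rest

theorem foldA_eq_shardRec (l : List Int) : ∀ (prev t sh : Int) (acc : List (Int × Int)),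
    sh = (l.length : Int) →
    (l.foldl
      (fun (st : Int × Int × Int × List (Int × Int)) _ =>
        let prev := st.1
        let tot := st.2.1
        let sh := st.2.2.1
        let acc := st.2.2.2
        let this_shard := PySem.Int.floordiv tot sh
        (prev + this_shard, tot - this_shard, sh - 1, acc ++ [(prev, this_shard)]))
      (prev, t, sh, acc)).2.2.2
    = acc ++ shardRec l.length prev t := by
  induction l with
  | nil => intro prev t sh acc _; simp [shardRec]
  | cons x xs ih =>
      intro prev t sh acc hsh
      subst hsh
      simp only [List.foldl_cons]
      rw [ih _ _ _ _ (by simp)]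
      simp only [List.length_cons, shardRec]
      push_cast
      simp

theorem foldB_eq_goB (q r nS : Int) (l : List Int) : ∀ (start : Int) (acc : List (Int × Int)),
    (l.foldl
      (fun (st : Int × List (Int × Int)) i =>
        let size := if nS - r ≤ i then q + 1 else q
        (st.1 + size, st.2 ++ [(st.1, size)]))
      (start, acc)).2
    = acc ++ goB q r nS start l := by
  induction l with
  | nil => intro start acc; simp [goB]
  | cons x xs ih =>
      intro start acc
      simp only [List.foldl_cons, goB]
      rw [ih]
      simp

-- index shift: feeding goB the successors with parameters of (t, m+1) equals goB on the
-- originals with parameters of (t - q, m), provided all indices lie in [0, m)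
theorem goB_shift (q r : Int) (m : Nat) (hr0 : 0 ≤ r) (hrm : r < (m : Int) + 1)
    (l : List Int) (hl : ∀ i ∈ l, 0 ≤ i ∧ i < (m : Int)) :
    ∀ start : Int,
      goB q r ((m : Int) + 1) start (l.map (· + 1))
      = goB (PySem.Int.floordiv (q * (m : Int) + r) (m : Int))
            (PySem.Int.mod (q * (m : Int) + r) (m : Int)) (m : Int) start l := by
  induction l with
  | nil => intro start; simp [goB]
  | cons x xs ih =>
      intro start
      obtain ⟨hx0, hxm⟩ := hl x (by simp)
      have hm : 0 < (m : Int) := by omega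
      have hq' : PySem.Int.floordiv (q * (m : Int) + r) (m : Int)
          = if r = (m : Int) then q + 1 else q := by
        rw [PySem.Int.floordiv_eq_ediv_of_pos hm]
        by_cases h : r = (m : Int)
        · rw [if_pos h, h,
            show q * (m : Int) + (m : Int) = (q + 1) * (m : Int) by ring]
          exact Int.mul_ediv_cancel _ (by omega)
        · rw [if_neg h,
            show q * (m : Int) + r = r + q * (m : Int) by ring,
            Int.add_mul_ediv_right _ _ (by omega : (m : Int) ≠ 0),
            Int.ediv_eq_zero_of_lt hr0 (by omega)]
          ring
      have hr' : PySem.Int.mod (q * (m : Int) + r) (m : Int)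
          = if r = (m : Int) then 0 else r := by
        rw [PySem.Int.mod_eq_emod_of_pos hm]
        by_cases h : r = (m : Int)
        · rw [if_pos h, h,
            show q * (m : Int) + (m : Int) = (q + 1) * (m : Int) by ring]
          simp
        · rw [if_neg h,
            show q * (m : Int) + r = r + (m : Int) * q by ring,
            Int.add_mul_emod_self_left]
          exact Int.emod_eq_of_lt hr0 (by omega)
      have hsize : (if ((m : Int) + 1) - r ≤ x + 1 then q + 1 else q)
          = (if (m : Int) - PySem.Int.mod (q * (m : Int) + r) (m : Int) ≤ x
              then PySem.Int.floordiv (q * (m : Int) + r) (m : Int) + 1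
              else PySem.Int.floordiv (q * (m : Int) + r) (m : Int)) := by
        rw [hq', hr']
        by_cases h : r = (m : Int)
        · rw [if_pos h, if_pos h, if_pos (by omega), if_neg (by omega)]
        · rw [if_neg h, if_neg h]
          by_cases h2 : (m : Int) - r ≤ x
          · rw [if_pos (by omega), if_pos h2]
          · rw [if_neg (by omega), if_neg h2]
      simp only [List.map_cons, goB]
      rw [hsize, ih (fun i hi => hl i (by simp [hi]))]

theorem goB_eq_shardRec (m : Nat) : ∀ (prev t : Int),
    goB (PySem.Int.floordiv t (m : Int)) (PySem.Int.mod t (m : Int)) (m : Int) prev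
        (PySem.List.pyRange 0 (m : Int) 1)
    = shardRec m prev t := by
  induction m with
  | zero => intro prev t; simp [goB, shardRec, PySem.List.pyRange_one_eq_nil]
  | succ m ih =>
      intro prev t
      have hm1 : (0 : Int) < (m : Int) + 1 := by omega
      set q := PySem.Int.floordiv t ((m : Int) + 1) with hq
      set r := PySem.Int.mod t ((m : Int) + 1) with hr
      have hqr : q * ((m : Int) + 1) + r = t := by
        rw [hq, hr]; exact PySem.Int.floordiv_mul_add_mod t _
      have hr0 : 0 ≤ r := by
        rw [hr, PySem.Int.mod_eq_emod_of_pos hm1]; exact Int.emod_nonneg t (by omega)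
      have hrm : r < (m : Int) + 1 := by
        rw [hr, PySem.Int.mod_eq_emod_of_pos hm1]; exact Int.emod_lt_of_pos t hm1
      have hrange : PySem.List.pyRange 0 ((m : Int) + 1) 1
          = 0 :: (PySem.List.pyRange 0 (m : Int) 1).map (· + 1) := by
        rw [PySem.List.pyRange_one_cons (by omega)]
        congr 1
        rw [PySem.List.pyRange_one, PySem.List.pyRange_one]
        simp only [List.map_map]
        rw [show ((m : Int) + 1 - (0 + 1)).toNat = ((m : Int) - 0).toNat by omega]
        apply List.map_congr_left
        intro a _; simp; ring
      simp only [shardRec]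
      push_cast
      rw [hrange]
      simp only [goB]
      rw [if_neg (by omega)]
      rw [goB_shift q r m hr0 hrm _
        (fun i hi => by
          have := (PySem.List.mem_pyRange_one (x := i) (a := 0) (b := (m : Int))).1 hi
          omega)]
      have ht' : t - q = q * (m : Int) + r := by linear_combination -hqr
      rw [← ih (prev + q) (t - q), ht']

-- ===== VERDICT (by name: the statement is the Claim_ definition above) =====
theorem balance_sharding_index_spec : Claim_equal_balance_sharding_index := by
  intro total shards _
  unfold Spec_balance_sharding_index balance_sharding_index balance_sharding_index_alt
  by_cases h : shards ≤ 0
  · rw [if_pos h, PySem.List.pyRange_one_eq_nil (by omega)]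
    simp
  · rw [if_neg h]
    have hlen : ((PySem.List.pyRange 0 shards 1).length : Int) = shards := by
      rw [PySem.List.length_pyRange_one]; omega
    rw [foldB_eq_goB, foldA_eq_shardRec _ _ _ _ _ hlen.symm]
    have hs : shards = (((PySem.List.pyRange 0 shards 1).length : Nat) : Int) := hlen.symm
    conv_rhs => rw [hs]
    rw [goB_eq_shardRec]
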